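-- pv_equiv track=rewrite | github.com/michalamitay770/pythonProject1 | tests_helper.py | is_sentence_has_more_than_half_duplications
-- ===== SOURCE A (Python) =====
-- def is_sentence_has_more_than_half_duplications(sentence):
--     wordsList = sentence.split()
--     my_dict = {}
--     for word in wordsList:
--         if word in my_dict.keys():
--             if my_dict[word] + 1 >= len(wordsList) // 2:
--                 return True
--             else:
--                 my_dict[word] = my_dict[word] + 1
--         else:
--             my_dict[word] = 1
--     return False
-- ===== SOURCE B (Python) =====
-- def is_sentence_has_more_than_half_duplications(sentence):
--     words = sentence.split()
--     threshold = max(2, len(words) // 2)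
--     return any(words.count(word) >= threshold for word in words)
-- ===== Notes on version B (the rewrite author's own statement) =====
-- stated objective: simpler
-- what changed: Replaced the incremental dict-counting loop with early return by a one-line check: compute the threshold max(2, len(words)//2) once and test with any() whether some word's total occurrence count reaches it.
import Mathlib
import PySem

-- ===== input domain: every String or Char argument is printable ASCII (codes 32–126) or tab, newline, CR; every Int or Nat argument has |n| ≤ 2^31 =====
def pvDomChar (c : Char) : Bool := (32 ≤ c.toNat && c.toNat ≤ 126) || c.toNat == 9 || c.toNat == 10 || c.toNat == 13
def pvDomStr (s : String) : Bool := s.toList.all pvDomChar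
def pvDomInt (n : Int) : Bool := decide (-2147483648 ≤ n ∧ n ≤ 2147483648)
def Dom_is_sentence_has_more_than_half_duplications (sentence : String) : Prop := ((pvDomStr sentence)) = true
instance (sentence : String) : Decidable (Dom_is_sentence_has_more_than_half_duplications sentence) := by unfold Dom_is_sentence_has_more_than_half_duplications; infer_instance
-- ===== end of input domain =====

-- B replaces A's incremental dict-count loop with an any/count one-liner over a fixed threshold (objective: simpler).

-- ===== PORT A =====
-- the for-loop over wordsList with the running dict and the early `return True`
def pvLoopA (n : Int) : List String → PySem.Dict String Int → Bool
  | [], _ => false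
  | word :: rest, my_dict =>
    match PySem.Dict.get? my_dict word with
    | some c =>
      if c + 1 ≥ PySem.Int.floordiv n 2 then true
      else pvLoopA n rest (PySem.Dict.insert my_dict word (c + 1))
    | none => pvLoopA n rest (PySem.Dict.insert my_dict word 1)

def is_sentence_has_more_than_half_duplications (sentence : String) : Bool :=
  let wordsList := PySem.Str.split₀ sentence
  pvLoopA (wordsList.length : Int) wordsList PySem.Dict.empty

-- ===== PORT B =====
def is_sentence_has_more_than_half_duplications_alt (sentence : String) : Bool :=
  let words := PySem.Str.split₀ sentence
  let threshold := max 2 (PySem.Int.floordiv (words.length : Int) 2)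
  words.any (fun word => PySem.List.count words word ≥ threshold)

-- ===== PRECONDITION & SPEC =====
def Spec_is_sentence_has_more_than_half_duplications (sentence : String) (out : Bool) : Prop := out = is_sentence_has_more_than_half_duplications_alt sentence
instance (sentence : String) (out : Bool) : Decidable (Spec_is_sentence_has_more_than_half_duplications sentence out) := by unfold Spec_is_sentence_has_more_than_half_duplications; infer_instance

-- ===== CLAIM (what is proved, stated in full; the proofs are below) =====
def Claim_equal_is_sentence_has_more_than_half_duplications : Prop := ∀ (sentence : String), Dom_is_sentence_has_more_than_half_duplications sentence → Spec_is_sentence_has_more_than_half_duplications sentence (is_sentence_has_more_than_half_duplications sentence)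

-- ===== LEMMAS AND PROOFS =====

-- Python's `// 2` is floor division; for the positive divisor 2 it coincides with Lean's Int `/ 2`.
theorem pvFd (n : Int) : PySem.Int.floordiv n 2 = n / 2 := by
  show Int.fdiv n 2 = n / 2
  rw [Int.fdiv_eq_ediv]; simp

-- A's loop returns true iff some word of the remaining list reaches the threshold,
-- where the dict carries the (positive) counts of the already-processed prefix.
theorem pvLoopA_iff (n : Int) (ws : List String) (d : PySem.Dict String Int)
    (hd : ∀ w c, PySem.Dict.get? d w = some c → 1 ≤ c) :
    pvLoopA n ws d = true ↔
      ∃ w ∈ ws, max 2 (n / 2) ≤ PySem.Dict.getD d w 0 + (ws.count w : Int) := by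
  induction ws generalizing d with
  | nil => simp [pvLoopA]
  | cons word rest ih =>
    have hd' : ∀ v : Int, 1 ≤ v → ∀ w c,
        PySem.Dict.get? (PySem.Dict.insert d word v) w = some c → 1 ≤ c := by
      intro v hv w c h
      by_cases hw : w = word
      · subst hw; rw [PySem.Dict.get?_insert_self] at h
        injection h with h'; omega
      · rw [PySem.Dict.get?_insert_of_ne _ _ hw] at h; exact hd w c h
    have hstep : ∀ (v : Int) (w : String), v = PySem.Dict.getD d word 0 + 1 →
        (PySem.Dict.getD (PySem.Dict.insert d word v) w 0 + (rest.count w : Int)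
          = PySem.Dict.getD d w 0 + ((word :: rest).count w : Int)) := by
      intro v w hv
      by_cases hww : word = w
      · subst hww
        rw [PySem.Dict.getD_insert_self, List.count_cons_self, hv]
        push_cast; ring
      · rw [PySem.Dict.getD_insert_of_ne _ _ _ (fun h => hww h.symm)]
        simp [hww]
    rcases hg : PySem.Dict.get? d word with _ | c
    · -- word not in dict
      have hgetD : PySem.Dict.getD d word 0 = 0 :=
        PySem.Dict.getD_of_get?_eq_none _ _ hg
      simp only [pvLoopA, hg]
      rw [ih _ (hd' 1 (by norm_num))]
      constructor
      · rintro ⟨w, hw, hle⟩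
        refine ⟨w, by simp [hw], ?_⟩
        rw [← hstep 1 w (by omega)]
        exact hle
      · rintro ⟨w, hw, hle⟩
        by_cases hww : word = w
        · subst hww
          rw [List.count_cons_self, hgetD] at hle
          have hcr : 1 ≤ (rest.count word : Int) := by
            by_contra hc
            have h0 : rest.count word = 0 := by omega
            rw [h0] at hle
            have h2 : (2:Int) ≤ max 2 (n / 2) := le_max_left _ _
            push_cast at hle; omega
          have hmem : word ∈ rest := by
            rw [← List.count_pos_iff]; exact_mod_cast hcr
          refine ⟨word, hmem, ?_⟩
          rw [hstep 1 word (by omega), List.count_cons_self, hgetD]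
          push_cast at hle ⊢; omega
        · rw [List.mem_cons] at hw
          rcases hw with hw | hw
          · exact absurd hw.symm hww
          · refine ⟨w, hw, ?_⟩
            rw [hstep 1 w (by omega)]
            exact hle
    · -- word already in dict with count c ≥ 1
      have hc1 : 1 ≤ c := hd word c hg
      have hgetD : PySem.Dict.getD d word 0 = c :=
        PySem.Dict.getD_of_get?_eq_some _ _ hg
      simp only [pvLoopA, hg, pvFd]
      by_cases hfire : c + 1 ≥ n / 2
      · rw [if_pos hfire]
        constructor
        · intro _
          refine ⟨word, List.mem_cons_self, ?_⟩
          rw [hgetD, List.count_cons_self]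
          have hcnt : (0:Int) ≤ (rest.count word : Int) := by positivity
          push_cast
          omega
        · intro _; rfl
      · rw [if_neg hfire]
        rw [ih _ (hd' (c + 1) (by omega))]
        constructor
        · rintro ⟨w, hw, hle⟩
          refine ⟨w, by simp [hw], ?_⟩
          rw [← hstep (c + 1) w (by omega)]
          exact hle
        · rintro ⟨w, hw, hle⟩
          by_cases hww : word = w
          · subst hww
            rw [List.count_cons_self, hgetD] at hle
            have hcr : 1 ≤ (rest.count word : Int) := by
              by_contra hcn
              have h0 : rest.count word = 0 := by omega
              rw [h0] at hle
              have h2 := le_max_right 2 (n / 2)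
              push_cast at hle; omega
            have hmem : word ∈ rest := by
              rw [← List.count_pos_iff]; exact_mod_cast hcr
            refine ⟨word, hmem, ?_⟩
            rw [hstep (c + 1) word (by omega), List.count_cons_self, hgetD]
            push_cast at hle ⊢; omega
          · rw [List.mem_cons] at hw
            rcases hw with hw | hw
            · exact absurd hw.symm hww
            · refine ⟨w, hw, ?_⟩
              rw [hstep (c + 1) w (by omega)]
              exact hle

theorem pvEmpty_get? (w : String) :
    PySem.Dict.get? (PySem.Dict.empty : PySem.Dict String Int) w = none := by
  simp [PySem.Dict.get?, PySem.Dict.empty]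

-- ===== VERDICT (by name: the statement is the Claim_ definition above) =====
theorem is_sentence_has_more_than_half_duplications_spec : Claim_equal_is_sentence_has_more_than_half_duplications := by
  intro sentence _
  unfold Spec_is_sentence_has_more_than_half_duplications
  unfold is_sentence_has_more_than_half_duplications is_sentence_has_more_than_half_duplications_alt
  set ws := PySem.Str.split₀ sentence with hws
  have hA := pvLoopA_iff (ws.length : Int) ws PySem.Dict.empty
    (by intro w c h; rw [pvEmpty_get?] at h; exact absurd h (by simp))
  have hz : ∀ w : String,
      PySem.Dict.getD (PySem.Dict.empty : PySem.Dict String Int) w 0 = 0 := by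
    intro w; exact PySem.Dict.getD_of_get?_eq_none _ _ (pvEmpty_get? w)
  simp only [hz, zero_add] at hA
  cases hb : pvLoopA (ws.length : Int) ws PySem.Dict.empty with
  | false =>
    symm
    rw [List.any_eq_false]
    intro w hw
    simp only [decide_eq_true_eq, ge_iff_le, not_le, PySem.List.count_eq, pvFd]
    have hnot := hA.not.mp (by simp [hb])
    push Not at hnot
    have := hnot w hw
    omega
  | true =>
    symm
    rw [List.any_eq_true]
    obtain ⟨w, hw, hle⟩ := hA.mp hb
    refine ⟨w, hw, ?_⟩
    simp only [decide_eq_true_eq, ge_iff_le, PySem.List.count_eq, pvFd]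
    exact hle
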